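-- pv_equiv track=rewrite | github.com/pypi-data/pypi-mirror-291 | packages/riyazi/riyazi-0.17.1-py3-none-any.whl/riyazi/ntheory/tests/test_special_number.py | semi_perfect
-- ===== SOURCE A (Python) =====
-- from math import sqrt
--
-- def factors(number: int) -> list[int]:
--     """
--     >>> factors(12)
--     [1, 2, 3, 4, 6]
--     >>> factors(1)
--     [1]
--     >>> factors(100)
--     [1, 2, 4, 5, 10, 20, 25, 50]
--
--     # >>> factors(-12)
--     # [1, 2, 3, 4, 6]
--     """
--
--     values = [1]
--     for i in range(2, int(sqrt(number)) + 1, 1):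
--         if number % i == 0:
--             values.append(i)
--             if int(number // i) != i:
--                 values.append(int(number // i))
--     return sorted(values)
--
-- def semi_perfect(number: int) -> bool:
--     """
--     >>> semi_perfect(0)
--     True
--     >>> semi_perfect(1)
--     True
--     >>> semi_perfect(12)
--     True
--     >>> semi_perfect(13)
--     False
--
--     # >>> semi_perfect(-12)
--     # True
--     """
--     values = factors(number)
--     r = len(values)
--     subset = [[0 for i in range(number + 1)] for j in range(r + 1)]
--     for i in range(r + 1):
--         subset[i][0] = True
--
--     for i in range(1, number + 1):
--         subset[0][i] = False
--
--     for i in range(1, r + 1):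
--         for j in range(1, number + 1):
--             if j < values[i - 1]:
--                 subset[i][j] = subset[i - 1][j]
--             else:
--                 subset[i][j] = subset[i - 1][j] or subset[i - 1][j - values[i - 1]]
--
--     return subset[r][number] != 0
-- ===== SOURCE B (Python) =====
-- def semi_perfect(number: int) -> bool:
--     # bitset subset-sum: bit j of reach = "some subset of the proper divisors seen so far sums to j"
--     reach = 1          # the empty subset sums to 0
--     reach |= reach << 1  # 1 is always a proper divisor here
--     i = 2
--     while i * i <= number:
--         if number % i == 0:
--             reach |= reach << i
--             q = number // i
--             if q != i:
--                 reach |= reach << q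
--         i += 1
--     return bool((reach >> number) & 1)
-- ===== Notes on version B (the rewrite author's own statement) =====
-- stated objective: faster
-- what changed: Replaces the (r+1)x(number+1) boolean DP table (and the sqrt-loop + sort that builds the divisor list) with a single big-integer bitmask whose bit j records that some subset of the proper divisors seen so far sums to j, updated by reach |= reach << d as each divisor is found.
import Mathlib
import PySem

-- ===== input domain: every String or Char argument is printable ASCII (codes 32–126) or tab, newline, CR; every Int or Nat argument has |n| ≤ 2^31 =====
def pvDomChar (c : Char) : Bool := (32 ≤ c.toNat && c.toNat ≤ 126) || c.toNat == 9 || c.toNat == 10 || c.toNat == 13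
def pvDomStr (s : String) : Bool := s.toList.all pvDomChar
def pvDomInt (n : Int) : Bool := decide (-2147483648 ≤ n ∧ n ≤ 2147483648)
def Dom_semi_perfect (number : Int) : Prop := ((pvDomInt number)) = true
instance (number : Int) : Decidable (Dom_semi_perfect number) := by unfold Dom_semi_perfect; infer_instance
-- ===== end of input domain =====

-- B replaces A's (r+1)x(number+1) boolean DP table by a single big-integer bitmask
-- (reach |= reach << d per divisor), measured faster; return value proved equal on 0 ≤ number.


-- ===== PORT A =====
-- factors(number): `int(sqrt(number))` is ported as Nat.sqrt, which is exact on the domain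
-- (for 0 ≤ number ≤ 2^31 the float sqrt truncates to the integer square root).
def pvFactorsVals (number : Int) : List Int :=
  (PySem.List.pyRange 2 ((number.toNat.sqrt : Int) + 1) 1).foldl
    (fun values i =>
      if PySem.Int.mod number i = 0 then
        if PySem.Int.floordiv number i ≠ i then values ++ [i] ++ [PySem.Int.floordiv number i]
        else values ++ [i]
      else values) [1]

def pvFactors (number : Int) : List Int := PySem.List.sorted (pvFactorsVals number) id false

-- the 2-D table is filled row by row from the previous row (Python's outer i / inner j loops);
-- only the rows are kept, each row j = 0..number as in the Python inner loop
def pvDPRow (n : Nat) (values : List Int) : List Bool :=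
  values.foldl
    (fun prev v =>
      (List.range (n + 1)).map (fun (j : Nat) =>
        if j = 0 then true
        else if (j : Int) < v then prev.getD j false
        else prev.getD j false || prev.getD (j - v.toNat) false))
    ((List.range (n + 1)).map (fun j => decide (j = 0)))

def semi_perfect (number : Int) : Bool :=
  (pvDPRow number.toNat (pvFactors number)).getD number.toNat false

-- ===== PORT B =====
-- while i*i <= number: shift-or the bitmask by i (and by q = number//i when distinct); here
-- i ≥ 2 and number ≥ 4, so q = number//i ≥ 0 and the Python shift amount q is q.toNat exactly
def pvLoopB (number : Int) (i : Nat) (reach : Nat) : Nat :=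
  if h : ((i : Int) * (i : Int)) ≤ number then
    let reach1 :=
      if PySem.Int.mod number (i : Int) = 0 then
        let r := reach ||| (reach <<< i)
        let q := PySem.Int.floordiv number (i : Int)
        if q ≠ (i : Int) then r ||| (r <<< q.toNat) else r
      else reach
    pvLoopB number (i + 1) reach1
  else reach
termination_by number.toNat + 2 - i
decreasing_by
  have h2 : ((i * i : Nat) : Int) ≤ number := by push_cast; exact h
  have h3 : i * i ≤ number.toNat := by omega
  have h4 : i ≤ i * i := by cases i with | zero => simp | succ k => exact Nat.le_mul_of_pos_left _ (Nat.succ_pos k)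
  omega

def semi_perfect_alt (number : Int) : Bool :=
  let reach := pvLoopB number 2 (1 ||| ((1 : Nat) <<< 1))
  ((reach >>> number.toNat) &&& 1) == 1

-- ===== PRECONDITION & SPEC =====
-- A calls math.sqrt(number), which raises ValueError for negative input (B's `reach >> number`
-- raises there too), so negative numbers are excluded.
def Pre_semi_perfect (number : Int) : Prop := 0 ≤ number
instance (number : Int) : Decidable (Pre_semi_perfect number) := by unfold Pre_semi_perfect; infer_instance
def pvWitness_semi_perfect : Int := (12)

def Spec_semi_perfect (number : Int) (out : Bool) : Prop := out = semi_perfect_alt number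
instance (number : Int) (out : Bool) : Decidable (Spec_semi_perfect number out) := by unfold Spec_semi_perfect; infer_instance

-- ===== CLAIM (what is proved, stated in full; the proofs are below) =====
def Claim_equal_semi_perfect : Prop := ∀ (number : Int), Dom_semi_perfect number → Pre_semi_perfect number → Spec_semi_perfect number (semi_perfect number)

-- ===== LEMMAS AND PROOFS =====

-- `canSum vs j` = some sub-multiset of vs sums to j (the common semantics of both programs)
def canSum : List Int → Int → Bool
  | [], j => j == 0
  | v :: vs, j => canSum vs j || canSum vs (j - v)

theorem canSum_zero (vs : List Int) : canSum vs 0 = true := by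
  induction vs with
  | nil => rfl
  | cons v vs ih => simp [canSum, ih]

theorem canSum_neg (vs : List Int) (hvs : ∀ v ∈ vs, 0 ≤ v) (j : Int) (hj : j < 0) :
    canSum vs j = false := by
  induction vs generalizing j with
  | nil => simp [canSum]; omega
  | cons v vs ih =>
      have hv : 0 ≤ v := hvs v (by simp)
      simp [canSum, ih (fun w hw => hvs w (by simp [hw])) j hj,
        ih (fun w hw => hvs w (by simp [hw])) (j - v) (by omega)]

theorem canSum_snoc (vs : List Int) (v j : Int) :
    canSum (vs ++ [v]) j = (canSum vs j || canSum vs (j - v)) := by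
  induction vs generalizing j with
  | nil => simp [canSum]
  | cons w vs ih =>
      simp only [List.cons_append, canSum, ih]
      rw [show j - w - v = j - v - w by ring]
      cases canSum vs j <;> cases canSum vs (j - w) <;>
        cases canSum vs (j - v) <;> cases canSum vs (j - v - w) <;> rfl

theorem canSum_perm {l l' : List Int} (hp : l.Perm l') : ∀ j, canSum l j = canSum l' j := by
  induction hp with
  | nil => intro j; rfl
  | cons v _ ih => intro j; simp [canSum, ih]
  | swap a b l =>
      intro j
      simp only [canSum]
      rw [show j - a - b = j - b - a by ring]
      cases canSum l j <;> cases canSum l (j - a) <;>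
        cases canSum l (j - b) <;> cases canSum l (j - b - a) <;> rfl
  | trans _ _ ih1 ih2 => intro j; rw [ih1, ih2]

-- the per-i contribution of the divisor scan, shared shape of both programs
def divSeq (number : Int) (i : Nat) : List Int :=
  if ((i : Int) * (i : Int)) ≤ number then
    (if PySem.Int.mod number (i : Int) = 0 then
        if PySem.Int.floordiv number (i : Int) ≠ (i : Int) then
          [(i : Int), PySem.Int.floordiv number (i : Int)]
        else [(i : Int)]
      else []) ++ divSeq number (i + 1)
  else []
termination_by number.toNat + 2 - i
decreasing_by
  have h2 : ((i * i : Nat) : Int) ≤ number := by push_cast; assumption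
  have h3 : i * i ≤ number.toNat := by omega
  have h4 : i ≤ i * i := by cases i with | zero => simp | succ k => exact Nat.le_mul_of_pos_left _ (Nat.succ_pos k)
  omega

theorem divSeq_nonneg (number : Int) (h0 : 0 ≤ number) (i : Nat) (hi : 1 ≤ i) :
    ∀ v ∈ divSeq number i, 0 ≤ v := by
  induction i using divSeq.induct number with
  | case1 i h ih =>
      intro v hv
      rw [divSeq, if_pos h] at hv
      rcases List.mem_append.1 hv with hv | hv
      · have hipos : (0 : Int) < (i : Int) := by exact_mod_cast hi
        have hq : 0 ≤ PySem.Int.floordiv number (i : Int) := by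
          rw [PySem.Int.floordiv_eq_ediv_of_pos hipos]
          exact Int.ediv_nonneg h0 hipos.le
        split_ifs at hv
        · simp at hv
          rcases hv with rfl | rfl
          · exact Int.natCast_nonneg i
          · exact hq
        · simp at hv
          subst hv
          exact Int.natCast_nonneg i
        · simp at hv
      · exact ih (by omega) v hv
  | case2 i h =>
      intro v hv
      rw [divSeq, if_neg h] at hv
      simp at hv

theorem foldRange (number : Int) (h0 : 0 ≤ number) (i : Nat) : ∀ acc : List Int,
    (PySem.List.pyRange (i : Int) ((number.toNat.sqrt : Int) + 1) 1).foldl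
      (fun values i =>
        if PySem.Int.mod number i = 0 then
          if PySem.Int.floordiv number i ≠ i then values ++ [i] ++ [PySem.Int.floordiv number i]
          else values ++ [i]
        else values) acc
    = acc ++ divSeq number i := by
  induction i using divSeq.induct number with
  | case1 i h ih =>
      intro acc
      have hib : (i : Int) < (number.toNat.sqrt : Int) + 1 := by
        have h2 : ((i * i : Nat) : Int) ≤ number := by push_cast; exact h
        have h3 : i * i ≤ number.toNat := by omega
        have h4 := Nat.le_sqrt.2 h3
        omega
      rw [PySem.List.pyRange_one_cons hib, List.foldl_cons,
        show ((i : Int) + 1) = ((i + 1 : Nat) : Int) by push_cast; ring, ih]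
      conv_rhs => rw [divSeq]
      rw [if_pos h]
      split_ifs <;> simp
  | case2 i h =>
      intro acc
      have hib : (number.toNat.sqrt : Int) + 1 ≤ (i : Int) := by
        by_contra hc
        have h4 : i ≤ number.toNat.sqrt := by omega
        have h5 : i * i ≤ number.toNat := Nat.le_sqrt.1 h4
        have : ((i * i : Nat) : Int) ≤ number := by omega
        apply h; push_cast at this; exact this
      have hnil : PySem.List.pyRange (i : Int) ((number.toNat.sqrt : Int) + 1) 1 = [] := by
        simp [PySem.List.pyRange]; omega
      rw [hnil]
      conv_rhs => rw [divSeq]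
      rw [if_neg h]
      simp

theorem factorsVals_eq (number : Int) (h0 : 0 ≤ number) :
    pvFactorsVals number = 1 :: divSeq number 2 := by
  have h := foldRange number h0 2 [1]
  unfold pvFactorsVals
  norm_num at h ⊢
  exact h

theorem pvLoopB_eq_fold (number : Int) (i : Nat) (reach : Nat) :
    pvLoopB number i reach =
      (divSeq number i).foldl (fun r d => r ||| (r <<< d.toNat)) reach := by
  induction i using divSeq.induct number generalizing reach with
  | case1 i h ih =>
      rw [pvLoopB]
      rw [dif_pos h, ih]
      conv_rhs => rw [divSeq]
      rw [if_pos h]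
      split_ifs <;> simp_all
  | case2 i h =>
      rw [pvLoopB, dif_neg h]
      conv_rhs => rw [divSeq]
      rw [if_neg h]
      simp

theorem shiftFold_testBit (l : List Int) (hl : ∀ d ∈ l, 0 ≤ d)
    (r : Nat) (p : List Int) (hpp : ∀ v ∈ p, 0 ≤ v)
    (hr : ∀ j : Nat, r.testBit j = canSum p (j : Int)) :
    ∀ j : Nat, (l.foldl (fun r d => r ||| (r <<< d.toNat)) r).testBit j
      = canSum (p ++ l) (j : Int) := by
  induction l generalizing r p with
  | nil => intro j; simpa using hr j
  | cons d l ih =>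
      have hd : 0 ≤ d := hl d (by simp)
      have hr' : ∀ j : Nat, (r ||| (r <<< d.toNat)).testBit j = canSum (p ++ [d]) (j : Int) := by
        intro j
        rw [Nat.testBit_or, Nat.testBit_shiftLeft, canSum_snoc, hr]
        by_cases hj : d.toNat ≤ j
        · have hc : ((j - d.toNat : Nat) : Int) = (j : Int) - d := by omega
          simp [hj, hr, hc]
        · have hneg : (j : Int) - d < 0 := by omega
          simp [hj, canSum_neg p hpp _ hneg]
      intro j
      have := ih (fun w hw => hl w (by simp [hw])) (r ||| (r <<< d.toNat)) (p ++ [d])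
        (by intro v hv; rcases List.mem_append.1 hv with hv | hv
            · exact hpp v hv
            · simp at hv; omega) hr' j
      simpa [List.foldl_cons] using this

theorem dp_fold (n : Nat) (vs : List Int) (hvs : ∀ v ∈ vs, 0 ≤ v)
    (prev : List Bool) (p : List Int) (hpp : ∀ v ∈ p, 0 ≤ v)
    (hlen : prev.length = n + 1)
    (hprev : ∀ j ≤ n, prev.getD j false = canSum p (j : Int)) :
    ∀ j ≤ n,
      (vs.foldl
        (fun prev v =>
          (List.range (n + 1)).map (fun (j : Nat) =>
            if j = 0 then true
            else if (j : Int) < v then prev.getD j false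
            else prev.getD j false || prev.getD (j - v.toNat) false)) prev).getD j false
      = canSum (p ++ vs) (j : Int) := by
  induction vs generalizing prev p with
  | nil => intro j hj; simpa using hprev j hj
  | cons v vs ih =>
      have hv : 0 ≤ v := hvs v (by simp)
      have hrow : ∀ j ≤ n,
          ((List.range (n + 1)).map (fun (j : Nat) =>
            if j = 0 then true
            else if (j : Int) < v then prev.getD j false
            else prev.getD j false || prev.getD (j - v.toNat) false)).getD j false
          = canSum (p ++ [v]) (j : Int) := by
        intro j hj
        rw [PySem.List.getD_map_range _ _ _ _ (by omega)]
        rcases Nat.eq_zero_or_pos j with rfl | hjp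
        · simp [canSum_zero]
        · rw [if_neg (by omega), canSum_snoc]
          by_cases hjv : (j : Int) < v
          · rw [if_pos hjv, hprev j hj,
              canSum_neg p hpp ((j : Int) - v) (by omega)]
            simp
          · have hvj : v.toNat ≤ j := by omega
            have hc : ((j - v.toNat : Nat) : Int) = (j : Int) - v := by omega
            rw [if_neg hjv, hprev j hj, hprev (j - v.toNat) (by omega), hc]
      intro j hj
      have := ih (fun w hw => hvs w (by simp [hw])) _ (p ++ [v])
        (by intro w hw; rcases List.mem_append.1 hw with hw | hw
            · exact hpp w hw
            · simp at hw; omega)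
        (by simp) hrow j hj
      simpa [List.foldl_cons] using this

theorem and_one_testBit (m n : Nat) : ((m >>> n) &&& 1 == 1) = m.testBit n := by
  rw [Nat.and_one_is_mod, Nat.shiftRight_eq_div_pow, Nat.testBit_eq_decide_div_mod_eq]
  rcases Nat.mod_two_eq_zero_or_one (m / 2 ^ n) with h | h <;> simp [h]

theorem initBit : ∀ j : Nat, (1 ||| (1 : Nat) <<< 1).testBit j = canSum [1] (j : Int) := by
  intro j
  match j with
  | 0 => decide
  | 1 => decide
  | (k + 2) =>
      have h2 : Nat.testBit (1 ||| (1 : Nat) <<< 1) (k + 2) = false := by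
        rw [show (1 ||| (1 : Nat) <<< 1) = 3 from rfl,
          show k + 2 = (k + 1) + 1 from rfl, Nat.testBit_succ, Nat.testBit_succ,
          show (3 : Nat) / 2 / 2 = 0 from rfl]
        exact Nat.zero_testBit k
      rw [h2]
      symm
      simp only [canSum]
      rw [Bool.or_eq_false_iff]
      constructor
      · rw [beq_eq_false_iff_ne]
        omega
      · rw [beq_eq_false_iff_ne]
        omega

-- ===== VERDICT (by name: the statement is the Claim_ definition above) =====
theorem semi_perfect_spec : Claim_equal_semi_perfect := by
  intro number _ hpre
  unfold Spec_semi_perfect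
  have h0 : (0 : Int) ≤ number := hpre
  have hperm : (pvFactors number).Perm (pvFactorsVals number) := PySem.List.sorted_perm _ _ _
  have hvals : pvFactorsVals number = 1 :: divSeq number 2 := factorsVals_eq number h0
  have hdiv : ∀ v ∈ divSeq number 2, 0 ≤ v := divSeq_nonneg number h0 2 (by norm_num)
  have hnn : ∀ v ∈ pvFactors number, 0 ≤ v := by
    intro v hv
    have hv' := hperm.mem_iff.1 hv
    rw [hvals] at hv'
    rcases List.mem_cons.1 hv' with rfl | hv'
    · norm_num
    · exact hdiv v hv'
  have hA : semi_perfect number =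
      canSum (pvFactors number) (number.toNat : Int) := by
    unfold semi_perfect pvDPRow
    have hpp0 : ∀ v ∈ ([] : List Int), 0 ≤ v := by
      intro v hv
      simp at hv
    have hlen0 : ((List.range (number.toNat + 1)).map
        (fun (j : Nat) => decide (j = 0))).length = number.toNat + 1 := by simp
    have hprev0 : ∀ j ≤ number.toNat, ((List.range (number.toNat + 1)).map
        (fun (j : Nat) => decide (j = 0))).getD j false = canSum [] (j : Int) := by
      intro j hj
      rw [PySem.List.getD_map_range _ _ _ _ (by omega)]
      rcases Nat.eq_zero_or_pos j with rfl | hjp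
      · decide
      · have h1 : decide (j = 0) = false := by simp; omega
        have h2 : (((j : Int)) == 0) = false := by
          rw [beq_eq_false_iff_ne]
          omega
        simp [canSum, h1, h2]
    have := dp_fold number.toNat (pvFactors number) hnn _ [] hpp0 hlen0 hprev0
      number.toNat (le_refl _)
    simpa using this
  have hbit : ∀ j : Nat, (pvLoopB number 2 (1 ||| (1 : Nat) <<< 1)).testBit j
      = canSum (1 :: divSeq number 2) (j : Int) := by
    intro j
    rw [pvLoopB_eq_fold]
    have := shiftFold_testBit (divSeq number 2) hdiv _ [1]
      (by intro v hv; simp at hv; omega) initBit j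
    simpa using this
  have hB : semi_perfect_alt number = canSum (1 :: divSeq number 2) (number.toNat : Int) := by
    simp only [semi_perfect_alt]
    rw [and_one_testBit, hbit]
  have hc : canSum (pvFactors number) (number.toNat : Int)
      = canSum (1 :: divSeq number 2) (number.toNat : Int) := by
    rw [← hvals]
    exact canSum_perm hperm _
  rw [hA, hc, hB]
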